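-- pv_equiv track=rewrite | github.com/AIClub-D/Emotion_Classification | subtitle_converter.py | remove_empty_line
-- ===== SOURCE A (Python) =====
-- def remove_empty_line(sentences):
--     rmidx = 0
--     while rmidx < len(sentences):
--         if len(sentences[rmidx])==0:
--             sentences.remove(sentences[rmidx])
--         else :
--             rmidx+=1
--     return sentences
-- ===== SOURCE B (Python) =====
-- def remove_empty_line(sentences):
--     w = 0
--     for r in range(len(sentences)):
--         if len(sentences[r]) != 0:
--             sentences[w] = sentences[r]
--             w += 1
--     del sentences[w:]
--     return sentences
-- ===== Notes on version B (the rewrite author's own statement) =====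
-- stated objective: alternative
-- what changed: Replaces the while-loop that repeatedly calls list.remove (a linear scan per deleted element) with a single-pass in-place two-pointer compaction (write index w, one truncation at the end); intended as faster on deletion-heavy inputs, measured only ~1.4x on the generated inputs.
import Mathlib
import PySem

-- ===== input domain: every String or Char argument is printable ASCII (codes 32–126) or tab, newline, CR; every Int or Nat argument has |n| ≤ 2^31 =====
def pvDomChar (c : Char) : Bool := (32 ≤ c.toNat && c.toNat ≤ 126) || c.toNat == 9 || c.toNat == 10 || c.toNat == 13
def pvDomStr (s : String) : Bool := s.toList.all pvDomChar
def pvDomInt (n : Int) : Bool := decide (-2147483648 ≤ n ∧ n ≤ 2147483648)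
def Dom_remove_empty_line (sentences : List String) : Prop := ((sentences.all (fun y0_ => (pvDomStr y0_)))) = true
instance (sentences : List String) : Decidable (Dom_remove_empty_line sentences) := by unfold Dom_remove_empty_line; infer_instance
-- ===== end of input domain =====

-- B replaces A's repeated list.remove scans by a one-pass in-place two-pointer compaction;
-- both Pythons mutate the argument list in place, the equivalence proved here is about the return value.

-- ===== PORT A =====
-- the while loop of A: state is the (mutated) list and the index rmidx
def remove_empty_line_go (xs : List String) (i : Nat) : List String :=
  match h : PySem.List.pyGet? xs (i : Int) with
  | none => xs
  | some s =>
    if PySem.Str.len s = 0 then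
      remove_empty_line_go ((PySem.List.remove? xs s).getD xs) i
    else
      remove_empty_line_go xs (i + 1)
termination_by xs.length - i
decreasing_by
  · rw [PySem.List.pyGet?_natCast] at h
    have hm : s ∈ xs := List.mem_of_getElem? h
    have hi : i < xs.length := (List.getElem?_eq_some_iff.mp h).1
    rw [PySem.List.remove?_eq_some_erase xs s hm]
    have := List.length_erase_of_mem hm
    simp only [Option.getD_some]
    omega
  · rw [PySem.List.pyGet?_natCast] at h
    have hi : i < xs.length := (List.getElem?_eq_some_iff.mp h).1
    omega

def remove_empty_line (sentences : List String) : List String :=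
  remove_empty_line_go sentences 0

-- ===== PORT B =====
def remove_empty_line_alt (sentences : List String) : List String :=
  let st := (PySem.List.pyRange 0 (PySem.List.len sentences) 1).foldl
    (fun (st : List String × Nat) (r : Int) =>
      match PySem.List.pyGet? st.1 r with
      | some s => if PySem.Str.len s = 0 then st else (st.1.set st.2 s, st.2 + 1)
      | none => st)
    (sentences, 0)
  st.1.take st.2

-- ===== PRECONDITION & SPEC =====
def Spec_remove_empty_line (sentences : List String) (out : List String) : Prop := out = remove_empty_line_alt sentences
instance (sentences : List String) (out : List String) : Decidable (Spec_remove_empty_line sentences out) := by unfold Spec_remove_empty_line; infer_instance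

-- ===== CLAIM (what is proved, stated in full; the proofs are below) =====
def Claim_equal_remove_empty_line : Prop := ∀ (sentences : List String), Dom_remove_empty_line sentences → Spec_remove_empty_line sentences (remove_empty_line sentences)

-- ===== LEMMAS AND PROOFS =====

-- the common characterisation: keep exactly the strings of nonzero length, in order
def pvKeep (s : String) : Bool := !(PySem.Str.len s == 0)

theorem erase_at (xs : List String) : ∀ (i : Nat), (hi : i < xs.length) →
    (∀ y ∈ xs.take i, y ≠ xs[i]) → xs.erase xs[i] = xs.take i ++ xs.drop (i + 1) := by
  induction xs with
  | nil => intro i hi; simp at hi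
  | cons a t ih =>
    intro i hi hne
    cases i with
    | zero => simp [List.erase_cons_head]
    | succ j =>
      have ha : a ≠ (a :: t)[j + 1] := hne a (by simp)
      have hj : j < t.length := by simpa using hi
      simp only [List.getElem_cons_succ] at ha ⊢
      rw [List.erase_cons_tail (by simpa using ha)]
      rw [ih j hj (fun y hy => hne y (by simp [hy]))]
      simp

theorem remove_empty_line_go_eq (xs : List String) (i : Nat)
    (hinv : ∀ y ∈ xs.take i, pvKeep y = true) :
    remove_empty_line_go xs i = xs.take i ++ (xs.drop i).filter pvKeep := by
  fun_induction remove_empty_line_go xs i with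
  | case1 xs i h =>
    rw [PySem.List.pyGet?_natCast] at h
    have hlen : xs.length ≤ i := by
      by_contra hc
      exact absurd h (by simp [List.getElem?_eq_getElem (by omega : i < xs.length)])
    simp [List.take_of_length_le hlen, List.drop_of_length_le hlen]
  | case2 xs i s h h0 ih =>
    rw [PySem.List.pyGet?_natCast] at h
    have hi : i < xs.length := (List.getElem?_eq_some_iff.mp h).1
    have hs : xs[i] = s := (List.getElem?_eq_some_iff.mp h).2
    have hk : pvKeep s = false := by simp only [pvKeep, h0]; decide
    have hm : s ∈ xs := List.mem_of_getElem? h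
    have hxs' : (PySem.List.remove? xs s).getD xs = xs.take i ++ xs.drop (i + 1) := by
      rw [PySem.List.remove?_eq_some_erase xs s hm, Option.getD_some, ← hs,
        erase_at xs i hi (fun y hy hcon => by
          have := hinv y hy; rw [hcon, hs, hk] at this; exact absurd this (by simp))]
    rw [hxs'] at ih ⊢
    have hlt : (xs.take i).length = i := by simp [List.length_take, Nat.min_eq_left (Nat.le_of_lt hi)]
    have htk : (xs.take i ++ xs.drop (i + 1)).take i = xs.take i := by
      rw [List.take_append_of_le_length (by omega), List.take_take]
      simp
    have hdr := List.drop_left (l₁ := xs.take i) (l₂ := xs.drop (i + 1))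
    rw [hlt] at hdr
    rw [ih (by rw [htk]; exact hinv), htk, hdr]
    have hdi : xs.drop i = xs[i] :: xs.drop (i + 1) := List.drop_eq_getElem_cons hi
    rw [hdi, List.filter_cons, hs, hk]
    simp
  | case3 xs i s h h0 ih =>
    rw [PySem.List.pyGet?_natCast] at h
    have hi : i < xs.length := (List.getElem?_eq_some_iff.mp h).1
    have hs : xs[i] = s := (List.getElem?_eq_some_iff.mp h).2
    have hb : (PySem.Str.len s == 0) = false := by simpa using h0
    have hk : pvKeep s = true := by simp only [pvKeep, hb]; decide
    have htk : xs.take (i + 1) = xs.take i ++ [xs[i]] := by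
      rw [List.take_add_one, List.getElem?_eq_getElem hi]; rfl
    rw [ih (by
      intro y hy
      rw [htk] at hy
      rcases List.mem_append.mp hy with h1 | h1
      · exact hinv y h1
      · simp at h1; rw [h1, hs]; exact hk)]
    rw [htk]
    have hdi : xs.drop i = xs[i] :: xs.drop (i + 1) := List.drop_eq_getElem_cons hi
    rw [hdi, List.filter_cons, hs, hk]
    simp

theorem take_set_self (l : List String) (n : Nat) (a : String) : (l.set n a).take n = l.take n := by
  apply List.ext_getElem <;> simp [List.getElem_take, List.getElem_set]
  intros; omega

theorem alt_fold_aux (xs : List String) (n : Nat) : ∀ (r : Nat) (ys : List String) (w : Nat),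
    xs.length - r ≤ n → w ≤ r → r ≤ xs.length → ys.length = xs.length → ys.drop r = xs.drop r →
    (((PySem.List.pyRange (r : Int) (xs.length : Int) 1).foldl
      (fun (st : List String × Nat) (rr : Int) =>
        match PySem.List.pyGet? st.1 rr with
        | some s => if PySem.Str.len s = 0 then st else (st.1.set st.2 s, st.2 + 1)
        | none => st)
      (ys, w)).1.take
     ((PySem.List.pyRange (r : Int) (xs.length : Int) 1).foldl
      (fun (st : List String × Nat) (rr : Int) =>
        match PySem.List.pyGet? st.1 rr with
        | some s => if PySem.Str.len s = 0 then st else (st.1.set st.2 s, st.2 + 1)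
        | none => st)
      (ys, w)).2) = ys.take w ++ (xs.drop r).filter pvKeep := by
  induction n with
  | zero =>
    intro r ys w hn hw hr hlen hdrop
    have hre : r = xs.length := by omega
    rw [hre, PySem.List.pyRange_one_eq_nil (le_refl _), List.foldl_nil]
    simp
  | succ n ih =>
    intro r ys w hn hw hr hlen hdrop
    by_cases hre : r = xs.length
    · rw [hre, PySem.List.pyRange_one_eq_nil (le_refl _), List.foldl_nil]
      simp
    · have hrl : r < xs.length := by omega
      rw [PySem.List.pyRange_one_cons (by exact_mod_cast hrl), List.foldl_cons]
      have hget : PySem.List.pyGet? ys (r : Int) = some xs[r] := by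
        rw [PySem.List.pyGet?_natCast]
        have h0 : ys[r]? = (ys.drop r)[0]? := by simp [List.getElem?_drop]
        rw [h0, hdrop]
        simp [List.getElem?_drop, List.getElem?_eq_getElem hrl]
      have hdi : xs.drop r = xs[r] :: xs.drop (r + 1) := List.drop_eq_getElem_cons hrl
      have hcast : (r : Int) + 1 = ((r + 1 : Nat) : Int) := by push_cast; ring
      rw [hget, hcast]
      dsimp only
      by_cases h0 : PySem.Str.len xs[r] = 0
      · have hk : pvKeep xs[r] = false := by simp only [pvKeep, h0]; decide
        rw [if_pos h0]
        rw [ih (r + 1) ys w (by omega) (by omega) (by omega) hlen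
          (by rw [← List.drop_drop, ← List.drop_drop, hdrop] )]
        rw [hdi, List.filter_cons, hk]
        simp
      · have hb : (PySem.Str.len xs[r] == 0) = false := by simpa using h0
        have hk : pvKeep xs[r] = true := by simp only [pvKeep, hb]; decide
        rw [if_neg h0]
        have hwl : w < ys.length := by omega
        rw [ih (r + 1) (ys.set w xs[r]) (w + 1) (by omega) (by omega) (by omega)
          (by simp [hlen])
          (by rw [List.drop_set_of_lt (by omega : w < r + 1), ← List.drop_drop, ← List.drop_drop, hdrop])]
        rw [hdi, List.filter_cons, hk]
        have htk : (ys.set w xs[r]).take (w + 1) = ys.take w ++ [xs[r]] := by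
          rw [List.take_add_one, take_set_self,
            List.getElem?_set_self (by omega : w < ys.length)]
          rfl
        rw [htk]
        simp

-- ===== VERDICT (by name: the statement is the Claim_ definition above) =====
theorem remove_empty_line_spec : Claim_equal_remove_empty_line := by
  intro xs _
  unfold Spec_remove_empty_line remove_empty_line remove_empty_line_alt
  rw [remove_empty_line_go_eq xs 0 (by simp)]
  have h2 := alt_fold_aux xs xs.length 0 xs 0 (by omega) (Nat.le_refl _) (Nat.zero_le _) rfl rfl
  simp only [Nat.cast_zero, List.take_zero, List.drop_zero, List.nil_append] at h2 ⊢
  rw [PySem.List.len_eq, ← h2]
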